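-- pv_equiv track=rewrite | github.com/kkkparty/Aibert_learn_repo | cursor_skills/source_code_learn_skill/scripts/replace_mermaid_with_images.py | find_mermaid_blocks_with_positions
-- ===== SOURCE A (Python) =====
-- from typing import List, Tuple
--
-- def find_mermaid_blocks_with_positions(content: str) -> List[Tuple[int, int, str]]:
--     """
--     查找 Mermaid 代码块的位置
--
--     Returns:
--         List of (start_pos, end_pos, mermaid_code)
--     """
--     blocks = []
--     lines = content.split('\n')
--
--     i = 0
--     while i < len(lines):
--         if lines[i].strip().startswith('```mermaid'):
--             start_line = i
--             i += 1
--             mermaid_lines = []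
--
--             while i < len(lines) and not lines[i].strip().startswith('```'):
--                 mermaid_lines.append(lines[i])
--                 i += 1
--
--             end_line = i
--             mermaid_code = '\n'.join(mermaid_lines)
--             blocks.append((start_line, end_line, mermaid_code))
--
--         i += 1
--
--     return blocks
-- ===== SOURCE B (Python) =====
-- from typing import List, Tuple
--
-- def find_mermaid_blocks_with_positions(content: str) -> List[Tuple[int, int, str]]:
--     lines = content.split('\n')
--     # pass 1: fence table — (line index, is-mermaid-opener flag) for every fence line
--     fences = [(i, line.strip().startswith('```mermaid'))
--               for i, line in enumerate(lines)
--               if line.strip().startswith('```')]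
--     # pass 2: pair each mermaid opener (strictly after the previous close) with the next fence
--     blocks = []
--     prev_close = -1
--     for k, (idx, is_mermaid) in enumerate(fences):
--         if is_mermaid and idx > prev_close:
--             closer = fences[k + 1][0] if k + 1 < len(fences) else len(lines)
--             blocks.append((idx, closer, '\n'.join(lines[idx + 1:closer])))
--             prev_close = closer
--     return blocks
-- ===== Notes on version B (the rewrite author's own statement) =====
-- stated objective: alternative
-- what changed: B first builds a fence table (line index, is-mermaid flag) in one comprehension pass over the lines, then a separate pairing pass over that table matches each mermaid opener strictly after the previous close with the next fence record (or len(lines) if none), replacing A's nested index-driven while loops.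
import Mathlib
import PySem

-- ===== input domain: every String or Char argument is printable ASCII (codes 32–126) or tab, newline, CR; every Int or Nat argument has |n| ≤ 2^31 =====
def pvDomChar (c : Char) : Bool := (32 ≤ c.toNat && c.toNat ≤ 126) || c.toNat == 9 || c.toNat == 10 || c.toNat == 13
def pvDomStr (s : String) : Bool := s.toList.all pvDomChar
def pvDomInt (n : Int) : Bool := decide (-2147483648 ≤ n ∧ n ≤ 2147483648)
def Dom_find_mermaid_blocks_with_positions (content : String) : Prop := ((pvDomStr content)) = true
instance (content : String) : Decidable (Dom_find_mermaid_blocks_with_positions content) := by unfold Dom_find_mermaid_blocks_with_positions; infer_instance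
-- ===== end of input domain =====

-- B replaces A's nested index-driven while-loops by a fence-table pass plus a pairing pass (alternative decomposition, same cost).

-- ===== PORT A =====
-- inner while loop: collect lines until the next '```'-fence (returns (mermaid_lines, end_line))
def pvA_inner (lines : List String) (i : Nat) : List String × Nat :=
  if h : i < lines.length then
    if PySem.Str.startswith (PySem.Str.strip lines[i]) "```" then ([], i)
    else
      let r := pvA_inner lines (i + 1)
      (lines[i] :: r.1, r.2)
  else ([], i)
termination_by lines.length - i

-- needed by pvA_outer's termination (i ≤ end_line)
theorem pvA_inner_ge (lines : List String) (i : Nat) : i ≤ (pvA_inner lines i).2 := by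
  rw [pvA_inner]
  split
  · split
    · exact le_refl i
    · have := pvA_inner_ge lines (i + 1)
      simp only
      omega
  · exact le_refl i
termination_by lines.length - i

-- outer while loop over line index i
def pvA_outer (lines : List String) (i : Nat) : List (Int × Int × String) :=
  if h : i < lines.length then
    if PySem.Str.startswith (PySem.Str.strip lines[i]) "```mermaid" then
      ((i : Int), (((pvA_inner lines (i + 1)).2 : Nat) : Int),
        PySem.Str.join "\n" (pvA_inner lines (i + 1)).1)
        :: pvA_outer lines ((pvA_inner lines (i + 1)).2 + 1)
    else pvA_outer lines (i + 1)
  else []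
termination_by lines.length - i
decreasing_by
  · have := pvA_inner_ge lines (i + 1); omega
  · omega

def find_mermaid_blocks_with_positions (content : String) : List (Int × Int × String) :=
  pvA_outer ((PySem.Str.split? content "\n").getD []) 0   -- sep "\n" ≠ "", so split? is always some

-- ===== PORT B =====
-- pass 1: fence table, one record (index, is-mermaid flag) per '```'-fence line
def pvB_fences (lines : List String) : List (Int × Bool) :=
  (PySem.List.enumerate lines).filterMap fun p =>
    if PySem.Str.startswith (PySem.Str.strip p.2) "```" then
      some (p.1, PySem.Str.startswith (PySem.Str.strip p.2) "```mermaid")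
    else none

-- pass 2: pair each mermaid opener strictly after prev_close with the next fence record
def pvB_pair (lines : List String) (n : Int) : List (Int × Bool) → Int → List (Int × Int × String)
  | [], _ => []
  | (idx, isM) :: rest, prev =>
    if isM && decide (prev < idx) then
      let closer := match rest with | [] => n | (j, _) :: _ => j
      (idx, closer, PySem.Str.join "\n" (PySem.List.slice lines (some (idx + 1)) (some closer)))
        :: pvB_pair lines n rest closer
    else pvB_pair lines n rest prev

def find_mermaid_blocks_with_positions_alt (content : String) : List (Int × Int × String) :=
  let lines := (PySem.Str.split? content "\n").getD []
  pvB_pair lines (lines.length : Int) (pvB_fences lines) (-1)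

-- ===== PRECONDITION & SPEC =====
def Spec_find_mermaid_blocks_with_positions (content : String) (out : List (Int × Int × String)) : Prop := out = find_mermaid_blocks_with_positions_alt content
instance (content : String) (out : List (Int × Int × String)) : Decidable (Spec_find_mermaid_blocks_with_positions content out) := by unfold Spec_find_mermaid_blocks_with_positions; infer_instance

-- ===== CLAIM (what is proved, stated in full; the proofs are below) =====
def Claim_equal_find_mermaid_blocks_with_positions : Prop := ∀ (content : String), Dom_find_mermaid_blocks_with_positions content → Spec_find_mermaid_blocks_with_positions content (find_mermaid_blocks_with_positions content)

-- ===== LEMMAS AND PROOFS =====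

-- proof-side view of the fence table, indexed by a start line
def pvF (lines : List String) (i : Nat) : List (Nat × Bool) :=
  if h : i < lines.length then
    if PySem.Str.startswith (PySem.Str.strip lines[i]) "```" then
      (i, PySem.Str.startswith (PySem.Str.strip lines[i]) "```mermaid") :: pvF lines (i + 1)
    else pvF lines (i + 1)
  else []
termination_by lines.length - i

def pvCast (p : Nat × Bool) : Int × Bool := ((p.1 : Int), p.2)

-- index of the first fence at or after i (lines.length if none)
def pvEnd (lines : List String) (i : Nat) : Nat :=
  match pvF lines i with
  | [] => lines.length
  | (j, _) :: _ => j

theorem pvF_mem (lines : List String) (i : Nat) :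
    ∀ p ∈ pvF lines i, i ≤ p.1 ∧ p.1 < lines.length := by
  intro p hp
  rw [pvF] at hp
  split at hp
  · split at hp
    · rcases List.mem_cons.1 hp with h | h
      · subst h; simp only; omega
      · have := pvF_mem lines (i + 1) p h; omega
    · have := pvF_mem lines (i + 1) p hp; omega
  · simp at hp
termination_by lines.length - i

theorem pvF_tail (lines : List String) (i : Nat) {j : Nat} {b : Bool} {rest : List (Nat × Bool)}
    (h : pvF lines i = (j, b) :: rest) : rest = pvF lines (j + 1) := by
  rw [pvF] at h
  split at h
  · split at h
    · simp only [List.cons.injEq, Prod.mk.injEq] at h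
      obtain ⟨⟨hj, -⟩, hr⟩ := h
      subst hj
      exact hr.symm
    · exact pvF_tail lines (i + 1) h
  · simp at h
termination_by lines.length - i

theorem pvEnd_bounds (lines : List String) (i : Nat) (hi : i ≤ lines.length) :
    i ≤ pvEnd lines i ∧ pvEnd lines i ≤ lines.length := by
  unfold pvEnd
  cases hF : pvF lines i with
  | nil => exact ⟨hi, le_refl _⟩
  | cons p rest =>
    have hm := pvF_mem lines i p (hF ▸ List.mem_cons_self)
    obtain ⟨p1, p2⟩ := p
    exact ⟨hm.1, le_of_lt hm.2⟩

-- the inner loop collects exactly the lines up to the next fence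
theorem pvA_inner_spec (lines : List String) (i : Nat) (hi : i ≤ lines.length) :
    pvA_inner lines i = ((lines.drop i).take (pvEnd lines i - i), pvEnd lines i) := by
  rw [pvA_inner]
  by_cases h : i < lines.length
  · rw [dif_pos h]
    by_cases hf : PySem.Str.startswith (PySem.Str.strip lines[i]) "```" = true
    · rw [if_pos hf]
      have hF : pvF lines i
          = (i, PySem.Str.startswith (PySem.Str.strip lines[i]) "```mermaid") :: pvF lines (i + 1) := by
        rw [pvF]; rw [dif_pos h, if_pos hf]
      unfold pvEnd
      rw [hF]
      simp
    · rw [if_neg hf]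
      have hF : pvF lines i = pvF lines (i + 1) := by
        rw [pvF]; rw [dif_pos h, if_neg hf]
      have hE : pvEnd lines i = pvEnd lines (i + 1) := by unfold pvEnd; rw [hF]
      have ih := pvA_inner_spec lines (i + 1) (by omega)
      have hb := pvEnd_bounds lines (i + 1) (by omega)
      rw [ih]
      simp only [hE]
      rw [List.drop_eq_getElem_cons h]
      have ht : pvEnd lines (i + 1) - i = (pvEnd lines (i + 1) - (i + 1)) + 1 := by omega
      rw [ht, List.take_succ_cons]
  · rw [dif_neg h]
    have hin : i = lines.length := by omega
    have hF : pvF lines i = [] := by rw [pvF]; rw [dif_neg h]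
    unfold pvEnd
    rw [hF]
    simp [hin]
termination_by lines.length - i

-- '```mermaid'-prefixed lines are '```'-prefixed
theorem pv_mermaid_fence (s : String)
    (h : PySem.Str.startswith s "```mermaid" = true) :
    PySem.Str.startswith s "```" = true := by
  simp only [PySem.Str.startswith] at h ⊢
  unfold PySem.Chars.startswith at h ⊢
  rw [List.isPrefixOf_iff_prefix] at h ⊢
  exact List.IsPrefix.trans (by decide) h

-- the fence table B builds is pvF (cast to Int indices)
theorem pvB_fences_drop (lines : List String) (i : Nat) :
    ((PySem.List.enumerate (lines.drop i) (i : Int)).filterMap fun p =>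
      if PySem.Str.startswith (PySem.Str.strip p.2) "```" then
        some (p.1, PySem.Str.startswith (PySem.Str.strip p.2) "```mermaid")
      else none) = (pvF lines i).map pvCast := by
  rw [pvF]
  by_cases h : i < lines.length
  · rw [dif_pos h]
    rw [List.drop_eq_getElem_cons h, PySem.List.enumerate_cons]
    have hcast : (i : Int) + 1 = ((i + 1 : Nat) : Int) := by push_cast; ring
    have ih := pvB_fences_drop lines (i + 1)
    by_cases hf : PySem.Str.startswith (PySem.Str.strip lines[i]) "```" = true
    · rw [if_pos hf]
      simp only [List.filterMap_cons, hf, if_pos, List.map_cons, pvCast]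
      refine congrArg₂ List.cons rfl ?_
      rw [hcast]
      exact ih
    · rw [if_neg hf]
      simp only [List.filterMap_cons, hf]
      rw [hcast]
      exact ih
  · rw [dif_neg h]
    have hd : lines.drop i = [] := List.drop_eq_nil_of_le (by omega)
    simp [hd]
termination_by lines.length - i

theorem pvB_fences_eq (lines : List String) :
    pvB_fences lines = (pvF lines 0).map pvCast := by
  have h := pvB_fences_drop lines 0
  simpa [pvB_fences] using h

-- main invariant: B's pairing pass over the fence table from line i equals A's outer loop at i
theorem pv_main (lines : List String) (i : Nat) (prev : Int) (hp : prev < (i : Int)) :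
    pvB_pair lines (lines.length : Int) ((pvF lines i).map pvCast) prev = pvA_outer lines i := by
  rw [pvA_outer, pvF]
  by_cases h : i < lines.length
  · rw [dif_pos h, dif_pos h]
    by_cases hm : PySem.Str.startswith (PySem.Str.strip lines[i]) "```mermaid" = true
    · have hf := pv_mermaid_fence _ hm
      rw [if_pos hf, if_pos hm]
      have hin := pvA_inner_spec lines (i + 1) (by omega)
      have hb := pvEnd_bounds lines (i + 1) (by omega)
      set e := pvEnd lines (i + 1) with he
      rw [hin]
      simp only [List.map_cons, pvCast, pvB_pair, hm, hp, decide_true, Bool.and_self, if_pos]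
      have hclo :
          (match (pvF lines (i + 1)).map pvCast with
            | [] => (lines.length : Int) | (j, _) :: _ => j) = (e : Int) := by
        rw [he]
        unfold pvEnd
        cases hF : pvF lines (i + 1) with
        | nil => simp
        | cons p rest => obtain ⟨p1, p2⟩ := p; simp [pvCast]
      have htail : pvB_pair lines (lines.length : Int) ((pvF lines (i + 1)).map pvCast) (e : Int)
          = pvA_outer lines (e + 1) := by
        cases hF : pvF lines (i + 1) with
        | nil =>
          have hen : e = lines.length := by rw [he]; unfold pvEnd; rw [hF]
          simp only [List.map_nil, pvB_pair]
          rw [pvA_outer, dif_neg (by omega)]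
        | cons p rest =>
          obtain ⟨j, b⟩ := p
          have hej : e = j := by rw [he]; unfold pvEnd; rw [hF]
          have hrest : rest = pvF lines (j + 1) := pvF_tail lines (i + 1) hF
          simp only [List.map_cons, pvCast, pvB_pair]
          rw [if_neg (by simp [hej])]
          rw [hrest, ← hej]
          exact pv_main lines (e + 1) (e : Int) (by push_cast; omega)
      rw [hclo, htail]
      have hslice : PySem.List.slice lines (some ((i : Int) + 1)) (some (e : Int))
          = (lines.drop (i + 1)).take (e - (i + 1)) := by
        have hc : (i : Int) + 1 = ((i + 1 : Nat) : Int) := by push_cast; ring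
        rw [hc, PySem.List.slice_natCast]
      rw [hslice]
    · rw [if_neg hm]
      by_cases hf : PySem.Str.startswith (PySem.Str.strip lines[i]) "```" = true
      · rw [if_pos hf]
        simp only [List.map_cons, pvCast, pvB_pair, hm]
        rw [if_neg (by simp)]
        exact pv_main lines (i + 1) prev (by push_cast; omega)
      · rw [if_neg hf]
        exact pv_main lines (i + 1) prev (by push_cast; omega)
  · rw [dif_neg h, dif_neg h]
    simp [pvB_pair]
termination_by lines.length - i
decreasing_by
  all_goals omega

-- ===== VERDICT (by name: the statement is the Claim_ definition above) =====
theorem find_mermaid_blocks_with_positions_spec : Claim_equal_find_mermaid_blocks_with_positions := by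
  intro content _
  unfold Spec_find_mermaid_blocks_with_positions
  simp only [find_mermaid_blocks_with_positions, find_mermaid_blocks_with_positions_alt]
  rw [pvB_fences_eq]
  exact (pv_main _ 0 (-1) (by norm_num)).symm
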